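-- pv_equiv track=rewrite | github.com/nikatchitadze22/GOA_homework | day 0127/classwork/ex1.py | char_concat
-- ===== SOURCE A (Python) =====
-- def char_concat(word):
--     result = []
--     left_side = 0
--     right_side = len(word) - 1
--     count = 1
--
--     while left_side < right_side:
--         result.append(word[left_side] + word[right_side] + str(count))
--         left_side += 1
--         right_side -= 1
--         count += 1
--
--     return ''.join(result)
-- ===== SOURCE B (Python) =====
-- def char_concat(word):
--     n = len(word)
--     half = n // 2
--     stack = []
--     rev_pairs = []
--     for k, c in enumerate(word):
--         if k < half:
--             stack.append(c)
--         elif k >= n - half: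
--             rev_pairs.append(stack.pop() + c)
--     return ''.join(p + str(i) for i, p in enumerate(reversed(rev_pairs), 1))
-- ===== Notes on version B (the rewrite author's own statement) =====
-- stated objective: alternative
-- what changed: Replaced A's two-pointer walk from both ends by a single left-to-right scan with a stack: the first half of the characters is pushed, each second-half character pops its partner off the stack, and the pair list (built back-to-front) is reversed and numbered at the end.
import Mathlib
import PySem

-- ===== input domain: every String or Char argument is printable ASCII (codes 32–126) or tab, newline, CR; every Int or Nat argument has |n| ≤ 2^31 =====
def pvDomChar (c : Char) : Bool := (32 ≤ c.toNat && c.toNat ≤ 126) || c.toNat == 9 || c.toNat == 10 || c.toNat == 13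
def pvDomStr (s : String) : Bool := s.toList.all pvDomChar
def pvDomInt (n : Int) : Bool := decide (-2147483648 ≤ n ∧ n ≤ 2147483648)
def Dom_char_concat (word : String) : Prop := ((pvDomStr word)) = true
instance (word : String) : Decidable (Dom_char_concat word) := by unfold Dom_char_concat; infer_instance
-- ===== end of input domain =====

-- B replaces A's two-pointer walk from both ends by a single left-to-right scan with a
-- stack: the first half is pushed, each second-half character pops its partner, and the
-- pairs (built back-to-front) are reversed and numbered at the end; same result.

-- ===== PORT A =====
-- A's while loop: indices l < r are always in range, so word[l]/word[r] is ported as getD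
-- (the default is never used; exact on every input).
def charLoopA (cs : List Char) (l r : Nat) (count : Int) : List String :=
  if _h : l < r then
    String.ofList ([cs.getD l 'a', cs.getD r 'a'] ++ PySem.Int.toChars count)
      :: charLoopA cs (l + 1) (r - 1) (count + 1)
  else []
termination_by r - l

def char_concat (word : String) : String :=
  PySem.Str.join "" (charLoopA word.toList 0 (word.toList.length - 1) 1)

-- ===== PORT B =====
-- Source B's loop body: stack.append / stack.pop become List append / (getLastD, dropLast);
-- the pop only fires when the stack is nonempty, so the default is never used.
def stepB (n half : Nat) (acc : List Char × List (List Char)) (kc : Int × Char) :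
    List Char × List (List Char) :=
  if kc.1 < (half : Int) then (acc.1 ++ [kc.2], acc.2)
  else if (n : Int) - (half : Int) ≤ kc.1 then
    (acc.1.dropLast, acc.2 ++ [[acc.1.getLastD 'a', kc.2]])
  else acc

def char_concat_alt (word : String) : String :=
  let cs := word.toList
  let n := cs.length
  let half := n / 2
  let res := (PySem.List.enumerate cs 0).foldl (stepB n half) ([], [])
  PySem.Str.join "" ((PySem.List.enumerate res.2.reverse 1).map
    (fun p => String.ofList (p.2 ++ PySem.Int.toChars p.1)))

-- ===== PRECONDITION & SPEC =====
def Spec_char_concat (word : String) (out : String) : Prop := out = char_concat_alt word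
instance (word : String) (out : String) : Decidable (Spec_char_concat word out) := by unfold Spec_char_concat; infer_instance

-- ===== CLAIM (what is proved, stated in full; the proofs are below) =====
def Claim_equal_char_concat : Prop := ∀ (word : String), Dom_char_concat word → Spec_char_concat word (char_concat word)

-- ===== LEMMAS AND PROOFS =====

-- the j-th character pair with counter j + 1, as a char list
def charTerm (cs : List Char) (j : Nat) : List Char :=
  [cs.getD j 'a', cs.getD (cs.length - 1 - j) 'a'] ++ PySem.Int.toChars (1 + (j : Int))

theorem charLoopA_eq (cs : List Char) (k : Nat) :
    ∀ l, cs.length / 2 - l = k →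
      charLoopA cs l (cs.length - 1 - l) ((l : Int) + 1) =
        (List.range' l k).map (fun j => String.ofList (charTerm cs j)) := by
  induction k with
  | zero =>
    intro l h
    unfold charLoopA
    rw [dif_neg (by omega)]
    simp
  | succ k ih =>
    intro l h
    unfold charLoopA
    rw [dif_pos (by omega)]
    have h1 : cs.length - 1 - l - 1 = cs.length - 1 - (l + 1) := by omega
    have h2 : ((l : Int) + 1) + 1 = ((l + 1 : Nat) : Int) + 1 := by push_cast; ring
    rw [h1, h2, ih (l + 1) (by omega), List.range'_succ]
    simp [charTerm, Int.add_comm]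

-- phase 1 of B's scan: while every index is below half, characters are just pushed
theorem phase1 (n half : Nat) : ∀ (xs : List Char) (s : Int) (st : List Char)
    (rp : List (List Char)), s + xs.length ≤ (half : Int) →
    (PySem.List.enumerate xs s).foldl (stepB n half) (st, rp) = (st ++ xs, rp) := by
  intro xs
  induction xs with
  | nil =>
    intro s st rp _
    simp [PySem.List.enumerate_nil]
  | cons c t ih =>
    intro s st rp h
    rw [PySem.List.enumerate_cons]
    simp only [List.foldl_cons]
    have hc : stepB n half (st, rp) (s, c) = (st ++ [c], rp) := by
      simp only [stepB]
      rw [if_pos (by push_cast [List.length_cons] at h ⊢; omega)]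
    rw [hc, ih (s + 1) (st ++ [c]) rp (by push_cast [List.length_cons] at h ⊢; omega)]
    simp

-- phase 2: once every index is at least n - half, each character pops its partner
theorem phase2 (n half : Nat) : ∀ (ys st : List Char) (rp : List (List Char)) (s : Int),
    (half : Int) ≤ s → (n : Int) - (half : Int) ≤ s → ys.length ≤ st.length →
    (PySem.List.enumerate ys s).foldl (stepB n half) (st, rp)
      = (st.take (st.length - ys.length),
         rp ++ (st.reverse.zip ys).map (fun p => [p.1, p.2])) := by
  intro ys
  induction ys with
  | nil =>
    intro st rp s _ _ _
    simp [PySem.List.enumerate_nil]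
  | cons c t ih =>
    intro st rp s h1 h2 hlen
    obtain ⟨st', a, rfl⟩ : ∃ st' a, st = st' ++ [a] := by
      rcases List.eq_nil_or_concat st with h | ⟨st', a, h⟩
      · exfalso; simp [h] at hlen
      · exact ⟨st', a, by simpa [List.concat_eq_append] using h⟩
    rw [PySem.List.enumerate_cons]
    simp only [List.foldl_cons]
    have hstep : stepB n half (st' ++ [a], rp) (s, c) = (st', rp ++ [[a, c]]) := by
      simp only [stepB]
      rw [if_neg (by omega), if_pos (by omega)]
      simp
    rw [hstep, ih st' (rp ++ [[a, c]]) (s + 1) (by omega) (by omega)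
      (by simp at hlen ⊢; omega)]
    simp only [List.length_append, List.length_cons, List.reverse_append,
      List.reverse_singleton, List.singleton_append, List.zip_cons_cons, List.map_cons,
      List.append_assoc]
    rw [List.take_append_of_le_length (by simp)]
    have harith : st'.length + (([] : List Char).length + 1) - (t.length + 1)
        = st'.length - t.length := by simp
    rw [harith]

-- the whole scan: the collected pairs are the first half (reversed) zipped with the second half
theorem resB (cs : List Char) :
    ((PySem.List.enumerate cs 0).foldl (stepB cs.length (cs.length / 2)) ([], [])).2
      = ((cs.take (cs.length / 2)).reverse.zip (cs.drop (cs.length - cs.length / 2))).map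
          (fun p => [p.1, p.2]) := by
  set n := cs.length with hn
  set half := n / 2 with hhalf
  have hle : half ≤ n := by omega
  have htl : (cs.take half).length = half := by simp; omega
  conv_lhs => rw [← List.take_append_drop half cs]
  rw [PySem.List.enumerate_append, List.foldl_append,
    phase1 n half (cs.take half) 0 [] [] (by simp [htl]), List.nil_append, htl]
  by_cases hpar : n - half = half
  · -- even length: the second phase starts immediately
    have hdl : (cs.drop half).length = half := by simp; omega
    rw [phase2 n half (cs.drop half) (cs.take half) [] ((0 : Int) + half)
      (by omega) (by omega) (by omega)]
    simp only [List.nil_append]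
    rw [show cs.length - cs.length / 2 = half by omega]
  · -- odd length: the middle character (index half) changes nothing
    have hodd : n - half = half + 1 := by omega
    have hhn : half < cs.length := by omega
    rw [List.drop_eq_getElem_cons hhn, PySem.List.enumerate_cons]
    simp only [List.foldl_cons]
    have hmid : stepB n half (cs.take half, []) ((0 : Int) + half, cs[half]) =
        (cs.take half, []) := by
      simp only [stepB]
      rw [if_neg (by omega), if_neg (by omega)]
    rw [hmid, phase2 n half (cs.drop (half + 1)) (cs.take half) [] ((0 : Int) + half + 1)
      (by omega) (by omega) (by simp; omega)]
    simp only [List.nil_append]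
    rw [show cs.length - cs.length / 2 = half + 1 by omega]

-- the numbered, reversed pair list is exactly A's term list
theorem listB_eq (cs : List Char) :
    (PySem.List.enumerate
        ((((cs.take (cs.length / 2)).reverse.zip (cs.drop (cs.length - cs.length / 2))).map
          (fun p => [p.1, p.2])).reverse) 1).map
        (fun p => String.ofList (p.2 ++ PySem.Int.toChars p.1))
      = (List.range' 0 (cs.length / 2)).map (fun j => String.ofList (charTerm cs j)) := by
  set n := cs.length with hn
  set half := n / 2 with hhalf
  have htl : (cs.take half).length = half := by simp; omega
  have hdl : (cs.drop (n - half)).length = half := by simp; omega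
  have hzl : ((cs.take half).reverse.zip (cs.drop (n - half))).length = half := by
    simp [htl, hdl]
  apply List.ext_getElem
  · simp [PySem.List.length_enumerate, hzl]
  · intro j h1 h2
    have hj : j < half := by
      simpa [PySem.List.length_enumerate, hzl] using h1
    have hjn : j < cs.length := by omega
    have hjn' : cs.length - 1 - j < cs.length := by omega
    have e1 : half - 1 - (half - 1 - j) = j := by omega
    have e2 : n - half + (half - 1 - j) = n - 1 - j := by omega
    simp only [PySem.List.getElem_enumerate, List.getElem_reverse, List.getElem_map,
      List.getElem_zip, List.getElem_range', List.getElem_take, List.getElem_drop,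
      hzl, List.length_map, htl, e1, e2, charTerm]
    simp [List.getD, hjn, hjn', Int.add_comm]
    rfl

theorem char_concat_eq_alt (word : String) : char_concat word = char_concat_alt word := by
  unfold char_concat char_concat_alt
  have hA := charLoopA_eq word.toList (word.toList.length / 2) 0 (by omega)
  simp only [Nat.sub_zero, Nat.cast_zero, zero_add] at hA
  rw [hA, ← List.range_eq_range'] at *
  simp only [resB, listB_eq, ← List.range_eq_range']

-- ===== VERDICT (by name: the statement is the Claim_ definition above) =====
theorem char_concat_spec : Claim_equal_char_concat := by
  intro word _
  exact char_concat_eq_alt word
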